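-- pv_equiv track=rewrite | github.com/AlfaPSH/alfa-py | encoder.py | encode_url
-- ===== SOURCE A (Python) =====
-- def encode_url(url):
--
--     mapping = {
--         'a': '01',
--         'b': '02',
--         'c': '03',
--         'd': '04',
--         'e': '05',
--         'f': '06',
--         'g': '07',
--         'h': '08',
--         'i': '09',
--         'j': '10',
--         'k': '11',
--         'l': '12',
--         'm': '13',
--         'n': '14',
--         'o': '15',
--         'p': '16',
--         'q': '17',
--         'r': '18',
--         's': '19',
--         't': '20',
--         'u': '21',
--         'v': '22',
--         'w': '23',
--         'x': '24',
--         'y': '25',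
--         'z': '26',
--         '.': '27',
--         ':': '28',
--         '/': '29'
--     }
--
--
--     encoded_url = ""
--     for char in url.lower():
--         if char.isalpha():
--             encoded_url += mapping[char]
--
--     return encoded_url
-- ===== SOURCE B (Python) =====
-- def encode_url(url):
--     # Table-driven: build a str.translate table once (letters -> two-digit code,
--     # every other char of the input -> deleted), then translate in one call.
--     s = url.lower()
--     table = {ord(c): None for c in set(s)}
--     for i in range(1, 27):
--         table[96 + i] = "%02d" % i
--     return s.translate(table)
-- ===== Notes on version B (the rewrite author's own statement) =====
-- stated objective: idiomatic
-- what changed: Replaces the explicit per-char loop with string accumulation and 29-entry dict by a single str.translate call over a translation table built once (arithmetic letter codes, non-letters mapped to deletion).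
import Mathlib
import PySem

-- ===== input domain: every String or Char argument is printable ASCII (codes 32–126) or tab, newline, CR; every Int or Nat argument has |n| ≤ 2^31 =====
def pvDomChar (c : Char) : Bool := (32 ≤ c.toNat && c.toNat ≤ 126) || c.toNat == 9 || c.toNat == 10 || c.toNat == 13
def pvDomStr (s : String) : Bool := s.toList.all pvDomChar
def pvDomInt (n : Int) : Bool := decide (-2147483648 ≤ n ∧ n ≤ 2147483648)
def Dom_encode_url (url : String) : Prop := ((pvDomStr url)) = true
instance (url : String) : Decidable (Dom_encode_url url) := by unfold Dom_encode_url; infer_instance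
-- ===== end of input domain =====

-- B replaces A's explicit accumulator loop over a 29-entry dict by one str.translate call
-- over a translation table built once (objective: idiomatic).

-- ===== PORT A =====
-- the dict literal of A
def pvMapping : PySem.Dict Char String := PySem.Dict.mk
  [('a', "01"), ('b', "02"), ('c', "03"), ('d', "04"), ('e', "05"), ('f', "06"),
   ('g', "07"), ('h', "08"), ('i', "09"), ('j', "10"), ('k', "11"), ('l', "12"),
   ('m', "13"), ('n', "14"), ('o', "15"), ('p', "16"), ('q', "17"), ('r', "18"),
   ('s', "19"), ('t', "20"), ('u', "21"), ('v', "22"), ('w', "23"), ('x', "24"),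
   ('y', "25"), ('z', "26"), ('.', "27"), (':', "28"), ('/', "29")]

-- mapping[char]'s KeyError is unreachable on Dom (a lowered ASCII char with isalpha is 'a'–'z',
-- a key of the dict), so the lookup is ported as getD with an unreachable default.
def encode_url (url : String) : String :=
  String.mk ((PySem.Str.lower url).toList.foldl
    (fun acc c => if PySem.Chars.isalpha c then acc ++ (pvMapping.getD c "").toList else acc) [])

-- ===== PORT B =====
-- {ord(c): None for c in set(s)}: a dict built over a Python set and only looked up afterwards
-- (all values identical), so the result is order-independent; then the range loop overwrites the
-- 26 letter keys with their codes ("%02d" % i ported as zfill of str(i), exact for 1 ≤ i ≤ 26).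
def pvTable (s : List Char) : PySem.Dict Int (Option (List Char)) :=
  (PySem.List.pyRange 1 27 1).foldl
    (fun d i => d.insert (96 + i) (some (PySem.Chars.zfill (PySem.Int.toStr i).toList 2)))
    ((PySem.Set.ofList s).foldl (fun d c => d.insert ((c.toNat : Int)) none) PySem.Dict.empty)

-- s.translate(table) ported by hand, exactly its per-char rule: table[ord(c)] = None deletes the
-- char, a string replaces it, a missing key keeps it.
def encode_url_alt (url : String) : String :=
  String.mk ((PySem.Str.lower url).toList.flatMap (fun c =>
    match (pvTable (PySem.Str.lower url).toList).get? ((c.toNat : Int)) with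
    | some none => []
    | some (some t) => t
    | none => [c]))

-- ===== PRECONDITION & SPEC =====
def Spec_encode_url (url : String) (out : String) : Prop := out = encode_url_alt url
instance (url : String) (out : String) : Decidable (Spec_encode_url url out) := by unfold Spec_encode_url; infer_instance

-- ===== CLAIM (what is proved, stated in full; the proofs are below) =====
def Claim_equal_encode_url : Prop := ∀ (url : String), Dom_encode_url url → Spec_encode_url url (encode_url url)

-- ===== LEMMAS AND PROOFS =====

-- lookup after the first building loop: keys are exactly the ords of s, all mapped to none
theorem pv_tbl0_get (l : List Char) (d : PySem.Dict Int (Option (List Char))) (k : Int) :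
    (l.foldl (fun d c => d.insert ((c.toNat : Int)) none) d).get? k
      = if k ∈ l.map (fun c => (c.toNat : Int)) then some none else d.get? k := by
  induction l generalizing d with
  | nil => simp
  | cons a l ih =>
      simp only [List.foldl_cons, ih, List.map_cons, List.mem_cons]
      by_cases hl : k ∈ l.map (fun c => (c.toNat : Int))
      · simp [hl]
      · rw [PySem.Dict.get?_insert]
        by_cases hk : k = ((a.toNat : Int)) <;> simp [hk, hl]

-- lookup after the second building loop: key 96+i (i in the list) is overwritten with v i
theorem pv_tbl1_get (l : List Int) (v : Int → Option (List Char))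
    (d : PySem.Dict Int (Option (List Char))) (k : Int) :
    (l.foldl (fun d i => d.insert (96 + i) (v i)) d).get? k
      = if (k - 96) ∈ l then some (v (k - 96)) else d.get? k := by
  induction l generalizing d with
  | nil => simp
  | cons a l ih =>
      simp only [List.foldl_cons, ih, List.mem_cons]
      by_cases hl : k - 96 ∈ l
      · simp [hl]
      · rw [PySem.Dict.get?_insert]
        by_cases hk : k = 96 + a
        · have : k - 96 = a := by omega
          simp [hk]
        · have : ¬ k - 96 = a := by omega
          simp [hk, this, hl]

-- the table's lookup for a char of s
theorem pv_table_get (s : List Char) (c : Char) (hc : c ∈ s) :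
    (pvTable s).get? ((c.toNat : Int))
      = if 97 ≤ c.toNat ∧ c.toNat ≤ 122 then
          some (some (PySem.Chars.zfill (PySem.Int.toStr ((c.toNat : Int) - 96)).toList 2))
        else some none := by
  unfold pvTable
  rw [pv_tbl1_get, pv_tbl0_get]
  have hmem : (c.toNat : Int) ∈ (PySem.Set.ofList s).map (fun c => (c.toNat : Int)) :=
    List.mem_map.mpr ⟨c, (PySem.Set.mem_ofList s c).mpr hc, rfl⟩
  by_cases h : 97 ≤ c.toNat ∧ c.toNat ≤ 122
  · have hr : ((c.toNat : Int) - 96) ∈ PySem.List.pyRange 1 27 1 :=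
      (PySem.List.mem_pyRange_one).mpr (by omega)
    simp [hr, h]
  · have hr : ¬ ((c.toNat : Int) - 96) ∈ PySem.List.pyRange 1 27 1 := by
      rw [PySem.List.mem_pyRange_one]; omega
    simp [hr, h, hmem]

-- A's per-char contribution equals B's per-char contribution, for chars below 127
theorem pv_char_step (n : Nat) (h : n < 127) :
    (if PySem.Chars.isalpha (Char.ofNat n) then (pvMapping.getD (Char.ofNat n) "").toList else []) =
    (if 97 ≤ n ∧ n ≤ 122 then
        PySem.Chars.zfill (PySem.Int.toStr ((n : Int) - 96)).toList 2 else []) := by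
  revert h; revert n; decide

theorem pv_char_step' (c : Char) (h : c.toNat < 127) :
    (if PySem.Chars.isalpha c then (pvMapping.getD c "").toList else []) =
    (if 97 ≤ c.toNat ∧ c.toNat ≤ 122 then
        PySem.Chars.zfill (PySem.Int.toStr ((c.toNat : Int) - 96)).toList 2 else []) := by
  have := pv_char_step c.toNat h
  simpa [Char.ofNat_toNat] using this

-- lowering a char below 127 stays below 127
theorem pv_lower_lt (n : Nat) (h : n < 127) : (PySem.Chars.lowerChar (Char.ofNat n)).toNat < 127 := by
  revert h; revert n; decide

-- flatMap congruence on members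
theorem pv_flatMap_congr {α β : Type} (f g : α → List β) (l : List α)
    (h : ∀ x ∈ l, f x = g x) : l.flatMap f = l.flatMap g := by
  induction l with
  | nil => rfl
  | cons a l ih => simp [h a (by simp), ih (fun x hx => h x (by simp [hx]))]

-- A's accumulator loop as a flatMap
theorem pv_foldl_as_flatMap (l : List Char) :
    l.foldl (fun acc c => if PySem.Chars.isalpha c then acc ++ (pvMapping.getD c "").toList else acc) []
      = l.flatMap (fun c => if PySem.Chars.isalpha c then (pvMapping.getD c "").toList else []) := by
  have : (fun (acc : List Char) c => if PySem.Chars.isalpha c then acc ++ (pvMapping.getD c "").toList else acc)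
      = (fun acc c => acc ++ (if PySem.Chars.isalpha c then (pvMapping.getD c "").toList else [])) := by
    funext acc c; split_ifs <;> simp
  rw [this, PySem.List.foldl_append_eq_flatMap]
  simp

-- ===== VERDICT (by name: the statement is the Claim_ definition above) =====
theorem encode_url_spec : Claim_equal_encode_url := by
  intro url hdom
  unfold Spec_encode_url encode_url encode_url_alt
  have hall : ∀ c ∈ url.toList, c.toNat < 127 := by
    intro c hc
    have := List.all_eq_true.mp hdom c hc
    simp [pvDomChar] at this
    omega
  have hlow : ∀ c ∈ (PySem.Str.lower url).toList, c.toNat < 127 := by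
    intro c hc
    rw [PySem.Str.toList_lower, PySem.Chars.lower] at hc
    obtain ⟨d, hd, rfl⟩ := List.mem_map.mp hc
    have := pv_lower_lt d.toNat (hall d hd)
    simpa [Char.ofNat_toNat] using this
  congr 1
  rw [pv_foldl_as_flatMap]
  apply pv_flatMap_congr
  intro c hc
  rw [pv_table_get _ c hc, pv_char_step' c (hlow c hc)]
  by_cases h : 97 ≤ c.toNat ∧ c.toNat ≤ 122 <;> simp [h]
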